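-- pv_equiv track=rewrite | github.com/smert-WoEN/Algorithm | task2025.py | f
-- ===== SOURCE A (Python) =====
-- def f(n, k):
--     inOneTeam = n // k
--     noOneTeam = n % k
--     count = 0
--     for i in range(noOneTeam):
--         n -= inOneTeam + 1
--         count += n * (inOneTeam + 1)
--     for i in range(k - noOneTeam):
--         n -= inOneTeam
--         count += n * inOneTeam
--     return count
-- ===== SOURCE B (Python) =====
-- def f(n, k):
--     # Teams: r groups of size q+1 and k-r groups of size q, where n = q*k + r.
--     # The answer is the sum of pairwise products of team sizes:
--     # (n^2 - sum of squared team sizes) / 2.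
--     q, r = divmod(n, k)
--     return (n * n - (r * (q + 1) ** 2 + (k - r) * q * q)) // 2
-- ===== Notes on version B (the rewrite author's own statement) =====
-- stated objective: faster
-- what changed: Replaced A's k-iteration loop over teams by the closed-form identity 'sum of pairwise products of team sizes = (n^2 - sum of squared team sizes)/2' computed directly from divmod(n, k); Pre_ restricts to the natural domain of a positive team count k > 0, excluding k = 0 (A raises ZeroDivisionError) and negative k, where A's 0 is only an artefact of both ranges being empty.
-- outside the precondition, e.g. on f(7, -3): A returns 0, B returns 33
import Mathlib
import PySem

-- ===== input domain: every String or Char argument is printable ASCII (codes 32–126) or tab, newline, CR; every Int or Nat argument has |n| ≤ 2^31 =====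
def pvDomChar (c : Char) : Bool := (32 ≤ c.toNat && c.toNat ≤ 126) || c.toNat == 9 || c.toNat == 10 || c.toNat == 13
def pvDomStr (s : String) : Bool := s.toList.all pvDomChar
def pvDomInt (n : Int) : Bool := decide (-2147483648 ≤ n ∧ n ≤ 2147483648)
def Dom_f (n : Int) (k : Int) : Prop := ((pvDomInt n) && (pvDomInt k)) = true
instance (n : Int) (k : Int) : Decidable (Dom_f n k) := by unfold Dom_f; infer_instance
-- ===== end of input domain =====

-- B replaces A's k-iteration loop by the closed-form pairwise-product formula (faster: O(1) vs O(k)).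

-- ===== PORT A =====
def f (n : Int) (k : Int) : Int :=
  let inOneTeam := PySem.Int.floordiv n k
  let noOneTeam := PySem.Int.mod n k
  let st1 := (PySem.List.pyRange 0 noOneTeam).foldl
    (fun (st : Int × Int) (_ : Int) =>
      (st.1 - (inOneTeam + 1), st.2 + (st.1 - (inOneTeam + 1)) * (inOneTeam + 1))) (n, 0)
  let st2 := (PySem.List.pyRange 0 (k - noOneTeam)).foldl
    (fun (st : Int × Int) (_ : Int) =>
      (st.1 - inOneTeam, st.2 + (st.1 - inOneTeam) * inOneTeam)) st1
  st2.2

-- ===== PORT B =====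
def f_alt (n : Int) (k : Int) : Int :=
  let q := PySem.Int.floordiv n k
  let r := PySem.Int.mod n k
  PySem.Int.floordiv (n * n - (r * (q + 1) ^ 2 + (k - r) * q * q)) 2

-- ===== PRECONDITION & SPEC =====
-- Pre_ restricts to the natural domain of a positive team count: it excludes k = 0,
-- on which Python's '//' and '%' raise ZeroDivisionError, and negative k, where A's
-- returned 0 is only an artefact of both ranges being empty.
def Pre_f (n : Int) (k : Int) : Prop := 0 < k
instance (n : Int) (k : Int) : Decidable (Pre_f n k) := by unfold Pre_f; infer_instance
def pvWitness_f : Int × Int := (7, 3)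

def Spec_f (n : Int) (k : Int) (out : Int) : Prop := out = f_alt n k
instance (n : Int) (k : Int) (out : Int) : Decidable (Spec_f n k out) := by unfold Spec_f; infer_instance

-- ===== CLAIM (what is proved, stated in full; the proofs are below) =====
def Claim_equal_f : Prop := ∀ (n : Int) (k : Int), Dom_f n k → Pre_f n k → Spec_f n k (f n k)

-- ===== LEMMAS AND PROOFS =====

-- Closed form of one pass of A's loop body with constant decrement s, run m times.
theorem pvLoop (s : Int) (m : Nat) (n0 c0 : Int) :
    ((List.range m).foldl (fun (st : Int × Int) (_ : Nat) =>
        (st.1 - s, st.2 + (st.1 - s) * s)) (n0, c0)).1 = n0 - (m : Int) * s ∧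
    2 * ((List.range m).foldl (fun (st : Int × Int) (_ : Nat) =>
        (st.1 - s, st.2 + (st.1 - s) * s)) (n0, c0)).2
      = 2 * c0 + 2 * (m : Int) * s * n0 - s * s * ((m : Int) * ((m : Int) + 1)) := by
  induction m with
  | zero => simp
  | succ m ih =>
    obtain ⟨h1, h2⟩ := ih
    simp only [List.range_succ, List.foldl_append, List.foldl_cons, List.foldl_nil]
    constructor
    · push_cast
      linear_combination h1
    · push_cast
      linear_combination h2 + 2 * s * h1

-- The final arithmetic identity tying the two loop closed forms to B's formula.
theorem pvAlg (q k r c1 c2 n1 n : Int) (hn : q * k + r = n)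
    (hn1 : n1 = n - (r * (q + 1)))
    (h1 : 2 * c1 = 2 * 0 + 2 * r * (q + 1) * n - (q + 1) * (q + 1) * (r * (r + 1)))
    (h2 : 2 * c2 = 2 * c1 + 2 * (k - r) * q * n1 - q * q * ((k - r) * ((k - r) + 1))) :
    n * n - (r * (q + 1) ^ 2 + (k - r) * q * q) = 2 * c2 := by
  subst hn
  linear_combination (-1 : Int) * h2 + (-1 : Int) * h1 - 2 * (k - r) * q * hn1

theorem f_eq_alt (n k : Int) (hpos : 0 < k) : f n k = f_alt n k := by
  have hre : PySem.Int.mod n k = n % k := PySem.Int.mod_eq_emod_of_pos hpos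
  have hr0 : 0 ≤ PySem.Int.mod n k := by rw [hre]; exact Int.emod_nonneg _ (by omega)
  have hrk : PySem.Int.mod n k < k := by rw [hre]; exact Int.emod_lt_of_pos _ hpos
  have hn : PySem.Int.floordiv n k * k + PySem.Int.mod n k = n :=
    PySem.Int.floordiv_mul_add_mod n k
  set q := PySem.Int.floordiv n k with hq
  set r := PySem.Int.mod n k with hrdef
  simp only [f, f_alt, ← hq, ← hrdef]
  rw [PySem.List.pyRange_zero, PySem.List.pyRange_zero, List.foldl_map, List.foldl_map]
  have L1 := pvLoop (q + 1) r.toNat n 0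
  rcases hst1 : (List.range r.toNat).foldl (fun (st : Int × Int) (_ : Nat) =>
      (st.1 - (q + 1), st.2 + (st.1 - (q + 1)) * (q + 1))) (n, 0) with ⟨n1, c1⟩
  rw [hst1] at L1
  obtain ⟨F1, E1⟩ := L1
  have L2 := pvLoop q (k - r).toNat n1 c1
  rcases hst2 : (List.range (k - r).toNat).foldl (fun (st : Int × Int) (_ : Nat) =>
      (st.1 - q, st.2 + (st.1 - q) * q)) (n1, c1) with ⟨n2, c2⟩
  rw [hst2] at L2
  obtain ⟨_, E2⟩ := L2
  rw [Int.toNat_of_nonneg hr0] at F1 E1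
  rw [Int.toNat_of_nonneg (by omega : (0:Int) ≤ k - r)] at E2
  have key : n * n - (r * (q + 1) ^ 2 + (k - r) * q * q) = 2 * c2 :=
    pvAlg q k r c1 c2 n1 n hn (by linear_combination F1) E1 E2
  rw [key, PySem.Int.floordiv_eq_ediv_of_pos (by norm_num : (0:Int) < 2),
      Int.mul_ediv_cancel_left _ (by norm_num : (2:Int) ≠ 0)]

-- ===== VERDICT (by name: the statement is the Claim_ definition above) =====
theorem f_spec : Claim_equal_f := by
  intro n k _ hk
  unfold Spec_f
  exact f_eq_alt n k hk
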